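-- pv_equiv track=rewrite | github.com/nathanielyong/csc110 | a4/a4_part4.py | ciphertext_to_grid
-- ===== SOURCE A (Python) =====
-- def ciphertext_to_grid(k: int, ciphertext: str) -> list[list[str]]:
--     """Return the grid corresponding to the given ciphertext.
--
--     Note that this grid should be the one that is used to generate the ciphertext.
--
--     Preconditions:
--         - k >= 1
--         - len(ciphertext) % k == 0
--         - ciphertext != ''
--     """
--     grid = []
--     x = len(ciphertext)
--     y = len(ciphertext) // k
--
--     for i in range(y):
--
--         row = []
--         for j in range(i, x, y):
--             row.append(ciphertext[j])
--
--         grid.append(row)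
--
--     return grid
-- ===== SOURCE B (Python) =====
-- def ciphertext_to_grid(k: int, ciphertext: str) -> list[list[str]]:
--     """Distribute the characters round-robin into the y rows in one pass."""
--     y = len(ciphertext) // k
--     if y <= 0:
--         return []
--     grid = [[] for _ in range(y)]
--     for p, ch in enumerate(ciphertext):
--         grid[p % y].append(ch)
--     return grid
-- ===== Notes on version B (the rewrite author's own statement) =====
-- stated objective: alternative
-- what changed: A gathers each row with its own strided inner index loop (one pass over range(i, len, y) per row); B makes a single left-to-right pass over the ciphertext, distributing each character round-robin into row (position mod y).
import Mathlib
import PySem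

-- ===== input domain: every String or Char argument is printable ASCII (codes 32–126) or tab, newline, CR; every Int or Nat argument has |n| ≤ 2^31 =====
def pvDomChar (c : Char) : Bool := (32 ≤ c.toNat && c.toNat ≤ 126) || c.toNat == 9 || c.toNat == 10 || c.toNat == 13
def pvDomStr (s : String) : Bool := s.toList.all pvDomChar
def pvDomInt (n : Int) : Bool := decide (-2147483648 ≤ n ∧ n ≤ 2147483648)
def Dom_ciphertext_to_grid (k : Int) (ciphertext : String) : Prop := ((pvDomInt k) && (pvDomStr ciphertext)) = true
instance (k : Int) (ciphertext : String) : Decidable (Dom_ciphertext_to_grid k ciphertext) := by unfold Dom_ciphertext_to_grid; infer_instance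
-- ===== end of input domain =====

-- B replaces A's column-by-column strided gathering (one inner index loop per row) with a single
-- left-to-right pass that distributes each character round-robin into row (position mod y); same values, different traversal.

-- ===== PORT A =====
def ciphertext_to_grid (k : Int) (ciphertext : String) : List (List String) :=
  let cs := ciphertext.toList
  let x : Int := cs.length
  let y : Int := PySem.Int.floordiv x k
  (PySem.List.pyRange 0 y 1).foldl
    (fun grid i =>
      grid ++ [(PySem.List.pyRange i x y).foldl
        (fun row j => row ++ [String.singleton (PySem.List.pyGetD cs j ' ')]) []])
    []

-- ===== PORT B =====
def ciphertext_to_grid_alt (k : Int) (ciphertext : String) : List (List String) :=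
  let cs := ciphertext.toList
  let y : Int := PySem.Int.floordiv (cs.length : Int) k
  if y ≤ 0 then []
  else
    (PySem.List.enumerate cs 0).foldl
      (fun grid pc =>
        grid.modify (PySem.Int.mod pc.1 y).toNat (fun row => row ++ [String.singleton pc.2]))
      (List.replicate y.toNat [])

-- ===== PRECONDITION & SPEC =====
-- Python A raises ZeroDivisionError exactly when k = 0 (len(ciphertext) // k); nothing else is excluded.
def Pre_ciphertext_to_grid (k : Int) (ciphertext : String) : Prop := k ≠ 0
instance (k : Int) (ciphertext : String) : Decidable (Pre_ciphertext_to_grid k ciphertext) := by unfold Pre_ciphertext_to_grid; infer_instance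
def pvWitness_ciphertext_to_grid : Int × String := (2, "abcd")

def Spec_ciphertext_to_grid (k : Int) (ciphertext : String) (out : List (List String)) : Prop := out = ciphertext_to_grid_alt k ciphertext
instance (k : Int) (ciphertext : String) (out : List (List String)) : Decidable (Spec_ciphertext_to_grid k ciphertext out) := by unfold Spec_ciphertext_to_grid; infer_instance

-- ===== CLAIM (what is proved, stated in full; the proofs are below) =====
def Claim_equal_ciphertext_to_grid : Prop := ∀ (k : Int) (ciphertext : String), Dom_ciphertext_to_grid k ciphertext → Pre_ciphertext_to_grid k ciphertext → Spec_ciphertext_to_grid k ciphertext (ciphertext_to_grid k ciphertext)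

-- ===== LEMMAS AND PROOFS =====

-- sel Y i p cs: the characters of cs (as 1-char strings, in order) whose running position,
-- counted from p, is ≡ i (mod Y) — the contents row i receives from the round-robin pass.
def sel (Y i : Nat) : Nat → List Char → List String
  | _, [] => []
  | p, c :: rest =>
      if p % Y = i then String.singleton c :: sel Y i (p + 1) rest
      else sel Y i (p + 1) rest

lemma map_getD_range {α : Type} (G : List α) (d : α) :
    (List.range G.length).map (fun i => G.getD i d) = G := by
  apply List.ext_getElem <;> simp [List.getD_eq_getElem?_getD]
  intro i h1 h2
  simp [List.getElem?_eq_getElem h2]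

lemma distribFold (Y : Nat) (cs : List Char) :
    ∀ (p : Nat) (G : List (List String)), G.length = Y →
      (PySem.List.enumerate cs (p : Int)).foldl
        (fun grid pc =>
          grid.modify (PySem.Int.mod pc.1 (Y : Int)).toNat (fun row => row ++ [String.singleton pc.2])) G
      = (List.range Y).map (fun i => G.getD i [] ++ sel Y i p cs) := by
  induction cs with
  | nil =>
      intro p G hG
      subst hG
      simp only [PySem.List.enumerate_nil, List.foldl_nil, sel, List.append_nil]
      exact (map_getD_range G []).symm
  | cons c rest ih =>
      intro p G hG
      rw [PySem.List.enumerate_cons, List.foldl_cons]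
      have hcast : (p : Int) + 1 = ((p + 1 : Nat) : Int) := by push_cast; ring
      rw [hcast]
      rw [show (PySem.Int.mod (p : Int) (Y : Int)).toNat = p % Y by
        rw [PySem.Int.mod_natCast]; exact Int.toNat_natCast _]
      rw [ih (p + 1) _ (by simpa using hG)]
      apply List.map_congr_left
      intro i hi
      have hiY : i < G.length := by rw [hG]; exact List.mem_range.mp hi
      by_cases h : p % Y = i
      · simp [sel, h, List.getD_eq_getElem?_getD, List.getElem?_eq_getElem hiY]
      · simp [sel, h, List.getD_eq_getElem?_getD, List.getElem?_eq_getElem hiY]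

lemma sel_eq_filter (Y i : Nat) :
    ∀ (cs : List Char) (p : Nat),
      sel Y i p cs
      = ((List.range cs.length).filter (fun t => (p + t) % Y == i)).map
          (fun t => String.singleton (cs.getD t ' ')) := by
  intro cs
  induction cs with
  | nil => intro p; simp [sel]
  | cons c rest ih =>
      intro p
      have hshift :
          ((List.range rest.length).filter (fun t => (p + (t + 1)) % Y == i))
            = ((List.range rest.length).filter (fun t => ((p + 1) + t) % Y == i)) := by
        apply List.filter_congr
        intro t _
        have : p + (t + 1) = (p + 1) + t := by omega
        rw [this]
      by_cases h : p % Y = i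
      · simp only [sel, if_pos h, ih (p + 1), List.length_cons, List.range_succ_eq_map,
          List.filter_cons, List.filter_map]
        simp [h, Function.comp_def, hshift]
      · simp only [sel, if_neg h, ih (p + 1), List.length_cons, List.range_succ_eq_map,
          List.filter_cons, List.filter_map]
        simp [h, Function.comp_def, hshift]

lemma row_indices (Y : Nat) (hY : 0 < Y) (i : Nat) (hi : i < Y) (n : Nat) :
    PySem.List.pyRange (i : Int) (n : Int) (Y : Int)
      = ((List.range n).filter (fun t => t % Y == i)).map (fun (t : Nat) => (t : Int)) := by
  have hY' : (0 : Int) < (Y : Int) := by exact_mod_cast hY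
  -- both sides are strictly increasing
  have sortedL : (PySem.List.pyRange (i : Int) (n : Int) (Y : Int)).Pairwise (· < ·) := by
    rw [PySem.List.pyRange_of_pos _ _ hY']
    rw [List.pairwise_map]
    refine (List.pairwise_lt_range).imp ?_
    intro a b hab
    have hc : (a : Int) < (b : Int) := by exact_mod_cast hab
    have := mul_lt_mul_of_pos_left hc hY'
    omega
  have sortedR : (((List.range n).filter (fun t => t % Y == i)).map (fun (t : Nat) => (t : Int))).Pairwise (· < ·) := by
    rw [List.pairwise_map]
    refine ((List.pairwise_lt_range).filter _).imp ?_
    intro a b hab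
    exact_mod_cast hab
  -- same members
  have hmem : ∀ x, x ∈ PySem.List.pyRange (i : Int) (n : Int) (Y : Int) ↔
      x ∈ ((List.range n).filter (fun t => t % Y == i)).map (fun (t : Nat) => (t : Int)) := by
    intro x
    rw [PySem.List.mem_pyRange_iff_of_pos hY']
    simp only [List.mem_map, List.mem_filter, List.mem_range, beq_iff_eq]
    constructor
    · rintro ⟨h1, h2, q, hq⟩
      have hx0 : 0 ≤ x := le_trans (by exact_mod_cast Nat.zero_le i) h1
      refine ⟨x.toNat, ⟨by omega, ?_⟩, by omega⟩
      -- x % Y = i on the Int side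
      have hq0 : 0 ≤ q := by
        by_contra hneg
        have : q ≤ -1 := by omega
        have : (Y : Int) * q ≤ (Y : Int) * (-1) := by
          exact mul_le_mul_of_nonneg_left this (le_of_lt hY')
        omega
      have hqc : ((q.toNat : Int)) = q := Int.toNat_of_nonneg hq0
      have hxe : x = (i : Int) + (Y : Int) * (q.toNat : Int) := by rw [hqc]; omega
      have hxt : x.toNat = i + Y * q.toNat := by
        have h2 : ((i + Y * q.toNat : Nat) : Int) = x := by push_cast; omega
        omega
      rw [hxt, Nat.add_mul_mod_self_left, Nat.mod_eq_of_lt hi]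
    · rintro ⟨t, ⟨htn, htm⟩, rfl⟩
      have h1 : (i : Int) ≤ (t : Int) := by
        have : i ≤ t := htm ▸ Nat.mod_le t Y
        exact_mod_cast this
      refine ⟨h1, by exact_mod_cast htn, ⟨((t / Y : Nat) : Int), ?_⟩⟩
      have := Nat.div_add_mod t Y
      have : t = Y * (t / Y) + i := by omega
      have : ((t : Int)) = (Y : Int) * ((t / Y : Nat) : Int) + (i : Int) := by
        exact_mod_cast this
      omega
  -- strictly increasing lists with the same members are equal
  have nodupL := sortedL.imp (fun h => ne_of_lt h)
  have nodupR := sortedR.imp (fun h => ne_of_lt h)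
  exact List.Perm.eq_of_pairwise
    (fun a b _ _ h1 h2 => absurd (h1.trans h2) (lt_irrefl a)) sortedL sortedR
    ((List.perm_ext_iff_of_nodup nodupL nodupR).mpr hmem)

-- ===== VERDICT (by name: the statement is the Claim_ definition above) =====
theorem ciphertext_to_grid_spec : Claim_equal_ciphertext_to_grid := by
  intro k s _ _
  show ciphertext_to_grid k s = ciphertext_to_grid_alt k s
  unfold ciphertext_to_grid ciphertext_to_grid_alt
  dsimp only
  set cs := s.toList with hcs
  set y := PySem.Int.floordiv (cs.length : Int) k with hy
  by_cases h : y ≤ 0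
  · rw [if_pos h, PySem.List.pyRange_one_eq_nil h, List.foldl_nil]
  · rw [if_neg h]
    push Not at h
    set Y := y.toNat with hYdef
    have hYpos : 0 < Y := by omega
    have hYcast : (Y : Int) = y := Int.toNat_of_nonneg (le_of_lt h)
    rw [← hYcast]
    simp only [PySem.List.foldl_append_singleton_eq_map, List.nil_append]
    rw [PySem.List.pyRange_one]
    simp only [Int.sub_zero, zero_add, Int.toNat_natCast]
    rw [show (0 : Int) = ((0 : Nat) : Int) from rfl,
      distribFold Y cs 0 (List.replicate Y []) (List.length_replicate)]
    rw [List.map_map]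
    apply List.map_congr_left
    intro t ht
    have htY : t < Y := List.mem_range.mp ht
    simp only [Function.comp_apply]
    rw [row_indices Y hYpos t htY cs.length, List.map_map, sel_eq_filter]
    simp [Function.comp_def, List.getD_eq_getElem?_getD, htY]
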